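-- pv_equiv track=rewrite | github.com/kartikwar/programming_practice | lists/others/smallest_subsequence_indices.py | solve
-- ===== SOURCE A (Python) =====
-- def solve(A, B):
-- 	result = {}
--
-- 	for char in B:
-- 		result[char] = 0
--
-- 	for char in A:
-- 		if char in B:
-- 			result[char] +=1
--
-- 	return sum(result.values())
-- ===== SOURCE B (Python) =====
-- def solve(A, B):
--     return sum(A.count(c) for c in set(B))
-- ===== Notes on version B (the rewrite author's own statement) =====
-- stated objective: simpler
-- what changed: B inverts the traversal: instead of A's per-character loop over A with a dict keyed and filtered by B, B loops over the distinct characters of B (set(B)) and sums A.count(c), with no dict and no dead B-initialization loop.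
import Mathlib
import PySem

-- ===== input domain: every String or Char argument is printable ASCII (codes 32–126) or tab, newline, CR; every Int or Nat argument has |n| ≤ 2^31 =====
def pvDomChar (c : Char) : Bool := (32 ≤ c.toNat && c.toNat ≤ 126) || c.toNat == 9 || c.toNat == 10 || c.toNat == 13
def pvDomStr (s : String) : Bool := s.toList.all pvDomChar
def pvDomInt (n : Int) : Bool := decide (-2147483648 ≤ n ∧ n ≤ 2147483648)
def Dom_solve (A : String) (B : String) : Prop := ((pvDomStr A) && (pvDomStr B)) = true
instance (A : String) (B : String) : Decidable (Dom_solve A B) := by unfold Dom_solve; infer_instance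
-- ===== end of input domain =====

-- B inverts the traversal: it loops over the DISTINCT characters of B (set(B)) and sums
-- A.count(c), dropping A's dict and its dead B-initialization loop (objective: simpler).

-- ===== PORT A =====
-- 'char in B' for a single iterated character is character membership in B's characters.
def solve (A : String) (B : String) : Int :=
  let result : PySem.Dict Char Int :=
    B.toList.foldl (fun d c => d.insert c 0) PySem.Dict.empty
  let result :=
    A.toList.foldl
      (fun d c => if B.toList.contains c then d.insert c (d.getD c 0 + 1) else d)
      result
  result.values.sum

-- ===== PORT B =====
-- sum(A.count(c) for c in set(B)); A.count(c) is str.count with the 1-char string c.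
def solve_alt (A : String) (B : String) : Int :=
  ((PySem.Set.ofList B.toList).map
    (fun c => (PySem.Str.count A (String.ofList [c]) : Int))).sum

-- ===== PRECONDITION & SPEC =====
def Spec_solve (A : String) (B : String) (out : Int) : Prop := out = solve_alt A B
instance (A : String) (B : String) (out : Int) : Decidable (Spec_solve A B out) := by unfold Spec_solve; infer_instance

-- ===== CLAIM (what is proved, stated in full; the proofs are below) =====
def Claim_equal_solve : Prop := ∀ (A : String) (B : String), Dom_solve A B → Spec_solve A B (solve A B)

-- ===== LEMMAS AND PROOFS =====

-- str.count with a single-character needle is List.count (non-overlapping scan, step 1)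
lemma pv_count_go_single (c : Char) : ∀ (fuel : ℕ) (l : List Char) (acc : ℕ),
    l.length ≤ fuel → PySem.Chars.count.go [c] fuel l acc = acc + l.count c := by
  intro fuel
  induction fuel with
  | zero =>
    intro l acc h
    match l, h with
    | [], _ => simp [PySem.Chars.count.go]
  | succ n ih =>
    intro l acc h
    cases l with
    | nil => simp [PySem.Chars.count.go]
    | cons a t =>
      rw [PySem.Chars.count.go]
      by_cases hc : a = c
      · simp [hc, List.isPrefixOf, ih t _ (by simpa using h)]
        omega
      · simp [List.isPrefixOf, Ne.symm hc, hc, ih t _ (by simpa using h)]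

lemma pv_count_single (cs : List Char) (c : Char) :
    PySem.Chars.count cs [c] = cs.count c := by
  simp [PySem.Chars.count, pv_count_go_single c cs.length cs 0 le_rfl]

-- indicator sum over a nodup list containing c is exactly 1
lemma pv_sum_indicator (ks : List Char) (c : Char) (hnd : ks.Nodup) (hc : c ∈ ks) :
    (ks.map (fun k => if k == c then (1 : Int) else 0)).sum = 1 := by
  rw [PySem.List.sum_map_ite_one_zero (fun k => k == c) ks]
  have : ks.countP (fun k => k == c) = ks.count c := rfl
  rw [this, List.count_eq_one_of_mem hnd hc]
  norm_num

-- summing F.count over a nodup list of keys covering every element of F gives F.length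
lemma pv_sum_counts (F ks : List Char) (hnd : ks.Nodup) (hsub : ∀ x ∈ F, x ∈ ks) :
    (ks.map (fun k => (F.count k : Int))).sum = (F.length : Int) := by
  induction F with
  | nil => simp
  | cons c F ih =>
    have hstep : (fun k => ((c :: F).count k : Int))
        = fun k => (F.count k : Int) + (if k == c then (1 : Int) else 0) := by
      funext k
      rw [List.count_cons]
      by_cases h : k = c <;> simp [h, Ne.symm]
    rw [hstep]
    have := PySem.List.sum_map_add_int (xs := ks)
      (f := fun k => (F.count k : Int)) (g := fun k => if k == c then (1 : Int) else 0)
    rw [this, ih (fun x hx => hsub x (List.mem_cons_of_mem _ hx)),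
        pv_sum_indicator ks c hnd (hsub c (List.mem_cons_self ..))]
    push_cast [List.length_cons]
    ring

-- the B-initialization dict maps everything to 0
lemma pv_getD_init (Bl : List Char) (d : PySem.Dict Char Int)
    (h : ∀ k, d.getD k 0 = 0) (k : Char) :
    (Bl.foldl (fun d c => d.insert c 0) d).getD k 0 = 0 := by
  induction Bl generalizing d with
  | nil => exact h k
  | cons c Bl ih =>
    simp only [List.foldl_cons]
    exact ih _ (fun k' => by rw [PySem.Dict.getD_insert]; split <;> simp [h])

-- updating a set with elements it already contains changes nothing
lemma pv_update_subset (F : List Char) (s : PySem.Set Char) (hsub : ∀ x ∈ F, x ∈ s) :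
    PySem.Set.update s F = s := by
  induction F generalizing s with
  | nil => rfl
  | cons c F ih =>
    have : PySem.Set.add s c = s := by
      unfold PySem.Set.add
      simp [PySem.Set.contains, hsub c (List.mem_cons_self ..)]
    calc PySem.Set.update s (c :: F) = PySem.Set.update (PySem.Set.add s c) F := rfl
      _ = PySem.Set.update s F := by rw [this]
      _ = s := ih s (fun x hx => hsub x (List.mem_cons_of_mem _ hx))

-- A's result equals the number of characters of A that occur in B
lemma pv_solve_eq (A B : String) :
    solve A B = (A.toList.countP (fun c => B.toList.contains c) : Int) := by
  unfold solve
  simp only []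
  set Bl := B.toList with hBl
  set L := A.toList with hL
  set p : Char → Bool := fun c => Bl.contains c with hp
  set r0 : PySem.Dict Char Int := Bl.foldl (fun d c => d.insert c 0) PySem.Dict.empty with hr0
  rw [PySem.List.foldl_if_eq_foldl_filter p (fun d c => d.insert c (d.getD c 0 + 1)) L r0]
  set F := L.filter p with hF
  set r1 := F.foldl (fun d c => d.insert c (d.getD c 0 + 1)) r0 with hr1
  have hk0 : r0.keys = PySem.Set.ofList Bl := by
    rw [hr0, PySem.Dict.keys_foldl_insert Bl (fun _ _ => (0 : Int)) PySem.Dict.empty]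
    rfl
  have hFES : ∀ x ∈ F, x ∈ PySem.Set.ofList Bl := by
    intro x hx
    have := List.of_mem_filter hx
    exact (PySem.Set.mem_ofList Bl x).mpr (by simpa [hp, List.contains_iff_mem] using this)
  have hnd0 : r0.keys.Nodup := by rw [hk0]; exact PySem.Set.nodup_ofList Bl
  have hk1 : r1.keys = PySem.Set.ofList Bl := by
    rw [hr1, PySem.Dict.keys_foldl_insert F (fun d c => d.getD c 0 + 1) r0, hk0]
    exact pv_update_subset F _ hFES
  have hnd1 : r1.keys.Nodup := by rw [hk1]; exact PySem.Set.nodup_ofList Bl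
  rw [PySem.Dict.values_eq_map_keys r1 hnd1 0, hk1]
  have hgd : ∀ k, r1.getD k 0 = (F.count k : Int) := by
    intro k
    rw [hr1, PySem.Dict.getD_foldl_insert_add_one F r0 k,
        pv_getD_init Bl PySem.Dict.empty (fun _ => rfl) k]
    ring
  calc ((PySem.Set.ofList Bl).map (fun k => r1.getD k 0)).sum
      = ((PySem.Set.ofList Bl).map (fun k => (F.count k : Int))).sum := by
        exact congrArg List.sum (List.map_congr_left (fun k _ => hgd k))
    _ = (F.length : Int) := pv_sum_counts F _ (PySem.Set.nodup_ofList Bl) hFES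
    _ = (L.countP p : Int) := by rw [hF, ← List.countP_eq_length_filter]

-- B's result equals the same count
lemma pv_solve_alt_eq (A B : String) :
    solve_alt A B = (A.toList.countP (fun c => B.toList.contains c) : Int) := by
  unfold solve_alt
  set Bl := B.toList with hBl
  set L := A.toList with hL
  set p : Char → Bool := fun c => Bl.contains c with hp
  set ks := PySem.Set.ofList Bl with hks
  have hmap : ks.map (fun c => (PySem.Str.count A (String.ofList [c]) : Int))
      = ks.map (fun c => (L.count c : Int)) := by
    refine List.map_congr_left (fun k _ => ?_)
    have h1 : (String.ofList [k]).toList = [k] := by simp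
    simp [PySem.Str.count, h1, pv_count_single, hL]
  rw [hmap]
  set F := L.filter p with hF
  have hcnt : ∀ k ∈ ks, ((L.count k : Int)) = (F.count k : Int) := by
    intro k hk
    have hpk : p k = true := by
      simpa [hp, List.contains_iff_mem] using (PySem.Set.mem_ofList Bl k).mp hk
    rw [hF, List.count_filter]
    simp_all
  rw [List.map_congr_left hcnt]
  have hsub : ∀ x ∈ F, x ∈ ks := by
    intro x hx
    have := List.of_mem_filter hx
    exact (PySem.Set.mem_ofList Bl x).mpr (by simpa [hp, List.contains_iff_mem] using this)
  rw [pv_sum_counts F ks (PySem.Set.nodup_ofList Bl) hsub, hF,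
      ← List.countP_eq_length_filter]

-- ===== VERDICT (by name: the statement is the Claim_ definition above) =====
theorem solve_spec : Claim_equal_solve := by
  intro A B _
  unfold Spec_solve
  rw [pv_solve_eq, pv_solve_alt_eq]
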